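-- pv_equiv track=rewrite | github.com/Kim-soung-won/Al_gorithm | 프로그래머스/1/135808. 과일 장수/과일 장수.py | solution
-- ===== SOURCE A (Python) =====
-- def solution(k, m, score):
--     answer: int = 0
--     score.sort(reverse = True)
--     box: list[list[int]] = []
--     for i in range(0, len(score), m):
--         box.append(score[i:i+m])
--     for apple in box:
--         if len(apple) == m:
--             answer += min(apple) * m
--     return answer
-- ===== SOURCE B (Python) =====
-- def solution(k, m, score):
--     # sort ascending (in place, like A but opposite direction), then the winners of the
--     # j-th full box (from the top) are score[n - j*m : n - (j-1)*m]; each full box sells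
--     # at its smallest element, which sits at index n - j*m in the ascending order.
--     score.sort()
--     n = len(score)
--     return m * sum(score[n - j * m] for j in range(1, n // m + 1))
-- ===== Notes on version B (the rewrite author's own statement) =====
-- stated objective: simpler
-- what changed: B replaces A's box-building pass (slicing into chunks, taking min of each full chunk) by a single closed-form sum: sort ascending and pick each full box's minimum directly at index n - j*m, so no intermediate list of boxes and no per-box min scans.
import Mathlib
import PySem

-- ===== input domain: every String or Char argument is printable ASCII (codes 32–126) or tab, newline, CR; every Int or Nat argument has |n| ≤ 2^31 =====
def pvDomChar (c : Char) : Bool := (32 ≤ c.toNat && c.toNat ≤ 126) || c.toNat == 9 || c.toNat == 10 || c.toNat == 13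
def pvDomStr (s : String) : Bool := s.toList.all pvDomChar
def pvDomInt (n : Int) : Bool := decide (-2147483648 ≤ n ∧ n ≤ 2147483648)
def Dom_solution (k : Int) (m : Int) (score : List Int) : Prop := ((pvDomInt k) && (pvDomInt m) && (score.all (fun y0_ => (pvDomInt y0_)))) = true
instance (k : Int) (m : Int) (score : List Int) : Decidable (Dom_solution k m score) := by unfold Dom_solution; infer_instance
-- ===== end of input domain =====

-- B drops A's box-building pass and per-box min scans for one closed-form sum over the
-- full boxes' minimum positions (objective: simpler). Equivalence is about the RETURN
-- value only: A sorts `score` in place descending, B ascending.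

-- ===== PORT A =====
def solution (k : Int) (m : Int) (score : List Int) : Int :=
  let s := PySem.List.sorted score (fun x => x) true
  let box : List (List Int) :=
    (PySem.List.pyRange 0 (s.length : Int) m).foldl
      (fun acc i => acc ++ [PySem.List.slice s (some i) (some (i + m))]) []
  box.foldl
    (fun answer apple =>
      if (apple.length : Int) = m then
        -- min(apple): the guard makes apple nonempty whenever it fires (under Pre_, m ≠ 0),
        -- so min? is `some` there; the .getD 0 default is never used on Pre_.
        answer + (PySem.List.min? apple (fun x => x)).getD 0 * m
      else answer) 0

-- ===== PORT B =====
def solution_alt (k : Int) (m : Int) (score : List Int) : Int :=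
  let s := PySem.List.sorted score (fun x => x)
  let n : Int := s.length
  m * ((PySem.List.pyRange 1 (PySem.Int.floordiv n m + 1) 1).map
        (fun j => PySem.List.pyGetD s (n - j * m) 0)).sum

-- ===== PRECONDITION & SPEC =====
-- A raises ValueError (range step 0) and B raises ZeroDivisionError when m = 0; that is
-- the only input either raises on, so Pre_ excludes exactly m = 0.
def Pre_solution (k : Int) (m : Int) (score : List Int) : Prop := m ≠ 0
instance (k : Int) (m : Int) (score : List Int) : Decidable (Pre_solution k m score) := by unfold Pre_solution; infer_instance
def pvWitness_solution : Int × Int × List Int := (6, 2, [1, 2, 5, 5, 2, 1])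

def Spec_solution (k : Int) (m : Int) (score : List Int) (out : Int) : Prop := out = solution_alt k m score
instance (k : Int) (m : Int) (score : List Int) (out : Int) : Decidable (Spec_solution k m score out) := by unfold Spec_solution; infer_instance

-- ===== CLAIM (what is proved, stated in full; the proofs are below) =====
def Claim_equal_solution : Prop := ∀ (k : Int) (m : Int) (score : List Int), Dom_solution k m score → Pre_solution k m score → Spec_solution k m score (solution k m score)

-- ===== LEMMAS AND PROOFS =====

-- desc sort is reverse of asc sort
theorem sorted_rev_eq_reverse (xs : List Int) :
    PySem.List.sorted xs (fun x => x) true = (PySem.List.sorted xs (fun x => x) false).reverse := by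
  have h := PySem.List.eq_of_perm_of_pairwise_le_of_injective (l₁ := (PySem.List.sorted xs (fun x => x) true).reverse)
    (l₂ := PySem.List.sorted xs (fun x => x) false) (fun x : Int => x) (fun a b h => h)
    (((PySem.List.sorted_perm xs (fun x => x) true).symm.trans (List.reverse_perm _).symm).symm.trans
      (PySem.List.sorted_perm xs (fun x => x) false).symm)
    (by simpa using (List.pairwise_reverse.mpr (PySem.List.sorted_pairwise_rev xs (fun x => x))))
    (PySem.List.sorted_pairwise xs (fun x => x))
  calc PySem.List.sorted xs (fun x => x) true
      = (PySem.List.sorted xs (fun x => x) true).reverse.reverse := by simp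
    _ = (PySem.List.sorted xs (fun x => x) false).reverse := by rw [h]


-- min of a full chunk of a descending list is its last element
theorem min_chunk_desc (s : List Int) (hs : s.Pairwise (fun a b => b ≤ a)) (a b : Nat)
    (hb : 0 < b) (hab : a + b ≤ s.length) :
    PySem.List.min? ((s.drop a).take b) (fun x => x) = some (s.getD (a + b - 1) 0) := by
  set t := (s.drop a).take b with ht
  have hlen : t.length = b := by simp [ht]; omega
  have htp : t.Pairwise (fun x y => y ≤ x) :=
    hs.sublist ((List.take_sublist _ _).trans (List.drop_sublist _ _))
  have htne : t ≠ [] := by intro h; rw [h] at hlen; simp at hlen; omega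
  obtain ⟨v, hv⟩ : ∃ v, PySem.List.min? t (fun x => x) = some v := by
    cases h : PySem.List.min? t (fun x => x) with
    | none => exact absurd ((PySem.List.min?_eq_none_iff t _).mp h) htne
    | some v => exact ⟨v, rfl⟩
  have hbl : b - 1 < t.length := by omega
  have hlast : t[b-1]'hbl = s.getD (a + b - 1) 0 := by
    have h1 : t[b-1]'hbl = s[a + (b-1)]'(by omega) := by
      simp [ht]
    rw [h1, List.getD_eq_getElem s 0 (by omega : a + b - 1 < s.length)]
    congr 1; omega
  have h1 : v ≤ t[b-1]'hbl := PySem.List.min?_isMin hv _ (List.getElem_mem hbl)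
  have h2 : t[b-1]'hbl ≤ v := by
    obtain ⟨i, hi, hiv⟩ := List.mem_iff_getElem.mp (PySem.List.min?_mem hv)
    rcases Nat.lt_or_ge i (b-1) with h | h
    · have := List.pairwise_iff_getElem.mp htp i (b-1) hi hbl h
      omega
    · have : i = b - 1 := by omega
      subst this; omega
  rw [hv, ← hlast]; congr 1; omega

theorem solution_eq_alt (k m : Int) (score : List Int) (hm : m ≠ 0) :
    solution k m score = solution_alt k m score := by
  unfold solution solution_alt
  rw [sorted_rev_eq_reverse]
  set a := PySem.List.sorted score (fun x => x) false with ha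
  have hfun : (fun (answer : Int) (apple : List Int) =>
      if ((apple.length : Int) = m) then answer + (PySem.List.min? apple (fun x => x)).getD 0 * m else answer)
      = fun answer apple => answer + (if ((apple.length : Int) = m) then (PySem.List.min? apple (fun x => x)).getD 0 * m else 0) := by
    funext ans ap; split <;> simp
  simp only [PySem.List.foldl_append_singleton_eq_map, List.nil_append, hfun,
    PySem.List.foldl_add, List.map_map, zero_add, List.length_reverse]
  rcases lt_or_gt_of_ne hm with hneg | hpos
  · -- m < 0 : both sides are empty sums
    have h1 : PySem.List.pyRange 0 (a.length : Int) m = [] := by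
      have h2 : ¬ (0 < m) := by omega
      have h3 : ¬ ((a.length : Int) < 0) := by simp
      simp [PySem.List.pyRange, hm, h2, h3]
    have hq : PySem.Int.floordiv (a.length : Int) m ≤ 0 := by
      have h4 := PySem.Int.floordiv_mul_add_mod (a.length : Int) m
      have h5 := PySem.Int.mod_neg_bounds (a.length : Int) hneg
      nlinarith [Int.natCast_nonneg a.length]
    rw [h1, PySem.List.pyRange_one_eq_nil (by omega)]
    simp
  · -- m > 0
    lift m to ℕ using (le_of_lt hpos) with mn
    have hmn : 0 < mn := by exact_mod_cast hpos
    have hfd : PySem.Int.floordiv (a.length : Int) (mn : Int) = ((a.length / mn : Nat) : Int) := by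
      exact_mod_cast PySem.Int.floordiv_natCast a.length mn
    set nn := a.length with hnn
    set qn := nn / mn with hqn
    set cn := (nn + mn - 1) / mn with hcn
    clear_value nn qn cn
    rw [hfd]
    -- B side range: range(1, qn+1)
    have e2 : ((qn : Int) + 1 - 1).toNat = qn := by omega
    rw [PySem.List.pyRange_one 1 ((qn : Int) + 1), e2]
    -- A side range: range(0, nn, mn)
    rw [PySem.List.pyRange_of_pos 0 (nn : Int) hpos]
    have hcnt : (if (0 : Int) < (nn : Int) then (((nn : Int) - 0 + (mn : Int) - 1) / (mn : Int)).toNat else 0) = cn := by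
      by_cases h0 : (0 : Int) < (nn : Int)
      · rw [if_pos h0]
        have e3 : ((nn : Int) - 0 + (mn : Int) - 1) = ((nn + mn - 1 : Nat) : Int) := by omega
        rw [e3, ← Int.natCast_div, Int.toNat_natCast, hcn]
      · rw [if_neg h0]
        have e4 : nn = 0 := by omega
        rw [hcn, e4]
        rw [Nat.div_eq_of_lt (by omega)]
    rw [hcnt]
    simp only [List.map_map, Function.comp_def]
    -- facts about qn, cn
    have hqle : qn * mn ≤ nn := by rw [hqn]; exact Nat.div_mul_le_self nn mn
    have hclt : nn < (qn + 1) * mn := by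
      calc nn < mn * (nn / mn) + mn := by
            have := Nat.mod_lt nn hmn; have := Nat.div_add_mod nn mn; omega
        _ = (qn + 1) * mn := by rw [hqn]; ring
    have hc1 : qn ≤ cn := by rw [hqn, hcn]; exact Nat.div_le_div_right (by omega)
    have hc2 : cn ≤ qn + 1 := by
      rcases Nat.eq_zero_or_pos nn with h0 | h0
      · rw [hcn, h0]; simp [Nat.div_eq_of_lt (by omega : mn - 1 < mn)]
      · have e5 : nn + mn - 1 = (nn - 1) + mn := by omega
        rw [hcn, e5, Nat.add_div_right _ hmn, hqn]
        have : (nn - 1) / mn ≤ nn / mn := Nat.div_le_div_right (by omega)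
        omega
    have hdesc : a.reverse.Pairwise (fun x y => y ≤ x) := by
      rw [List.pairwise_reverse]
      exact PySem.List.sorted_pairwise score (fun x => x)
    have hrevlen : a.reverse.length = nn := by rw [List.length_reverse, hnn]
    -- per-term evaluation on the A side
    have hterm : ∀ kk : Nat, kk < cn →
        (if (((PySem.List.slice a.reverse (some (0 + (mn : Int) * (kk : Int))) (some (0 + (mn : Int) * (kk : Int) + (mn : Int)))).length : Int) = (mn : Int)) then
          (PySem.List.min? (PySem.List.slice a.reverse (some (0 + (mn : Int) * (kk : Int))) (some (0 + (mn : Int) * (kk : Int) + (mn : Int)))) (fun x => x)).getD 0 * (mn : Int) else 0)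
        = (if (kk + 1) * mn ≤ nn then a.getD (nn - (kk + 1) * mn) 0 * (mn : Int) else 0) := by
      intro kk hk
      have hbr : (kk + 1) * mn = mn * kk + mn := by ring
      have h7 : (kk + 1) * mn ≤ nn + mn - 1 := by
        have h6 : kk + 1 ≤ cn := hk
        have := (Nat.le_div_iff_mul_le hmn).mp (hcn ▸ h6)
        omega
      have hlow : mn * kk < nn := by omega
      have e6 : (0 + (mn : Int) * (kk : Int)) = ((mn * kk : Nat) : Int) := by push_cast; ring
      have e7 : (0 + (mn : Int) * (kk : Int) + (mn : Int)) = ((mn * kk : Nat) : Int) + ((mn : Nat) : Int) := by push_cast; ring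
      rw [e7, e6, PySem.List.slice_natCast_add]
      have hlen : ((a.reverse.drop (mn * kk)).take mn).length = min mn (nn - mn * kk) := by
        simp [hrevlen]
      by_cases hfull : (kk + 1) * mn ≤ nn
      · have hfm : mn ≤ nn - mn * kk := by omega
        have hlenm : ((a.reverse.drop (mn * kk)).take mn).length = mn := by
          rw [hlen, Nat.min_eq_left hfm]
        rw [if_pos (by exact_mod_cast hlenm), if_pos hfull]
        rw [min_chunk_desc a.reverse hdesc (mn * kk) mn hmn (by rw [hrevlen]; omega)]
        simp only [Option.getD_some]
        congr 1
        rw [List.getD_eq_getElem _ _ (by rw [hrevlen]; omega : mn * kk + mn - 1 < a.reverse.length),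
            List.getElem_reverse,
            ← List.getD_eq_getElem a 0 (by rw [← hnn]; omega : a.length - 1 - (mn * kk + mn - 1) < a.length)]
        congr 1
        rw [← hnn]
        omega
      · have hfm : nn - mn * kk ≤ mn := by omega
        have hlenm : ((a.reverse.drop (mn * kk)).take mn).length ≠ mn := by
          rw [hlen, Nat.min_eq_right hfm]
          omega
        rw [if_neg (by exact_mod_cast hlenm), if_neg hfull]
    -- A side sum to canonical form
    have hA : ((List.range cn).map (fun (kk : Nat) =>
        (if (((PySem.List.slice a.reverse (some (0 + (mn : Int) * (kk : Int))) (some (0 + (mn : Int) * (kk : Int) + (mn : Int)))).length : Int) = (mn : Int)) then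
          (PySem.List.min? (PySem.List.slice a.reverse (some (0 + (mn : Int) * (kk : Int))) (some (0 + (mn : Int) * (kk : Int) + (mn : Int)))) (fun x => x)).getD 0 * (mn : Int) else 0))).sum
        = ((List.range qn).map (fun kk => a.getD (nn - (kk + 1) * mn) 0 * (mn : Int))).sum := by
      rw [List.map_congr_left (fun kk hk => hterm kk (List.mem_range.mp hk))]
      rcases Nat.lt_or_ge cn (qn + 1) with hlt | hge
      · have hceq : cn = qn := by omega
        rw [hceq]
        apply congrArg
        apply List.map_congr_left
        intro kk hk
        rw [List.mem_range] at hk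
        rw [if_pos (le_trans (Nat.mul_le_mul_right mn (by omega)) hqle)]
      · have hceq : cn = qn + 1 := by omega
        rw [hceq, List.range_succ, List.map_append, List.sum_append]
        have hz : (if (qn + 1) * mn ≤ nn then a.getD (nn - (qn + 1) * mn) 0 * (mn : Int) else 0) = 0 := by
          rw [if_neg (by omega)]
        simp only [List.map_cons, List.map_nil, hz, List.sum_cons, List.sum_nil, add_zero]
        apply congrArg
        apply List.map_congr_left
        intro kk hk
        rw [List.mem_range] at hk
        rw [if_pos (le_trans (Nat.mul_le_mul_right mn (by omega)) hqle)]
    -- B side to canonical form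
    have hB : ((List.range qn).map (fun (kk : Nat) => PySem.List.pyGetD a ((nn : Int) - ((1 : Int) + (kk : Int)) * (mn : Int)) 0)).sum
        = ((List.range qn).map (fun kk => a.getD (nn - (kk + 1) * mn) 0)).sum := by
      apply congrArg
      apply List.map_congr_left
      intro kk hk
      rw [List.mem_range] at hk
      have hk1 : (kk + 1) * mn ≤ nn := le_trans (Nat.mul_le_mul_right mn (by omega)) hqle
      have e8 : ((1 : Int) + (kk : Int)) * (mn : Int) = (((kk + 1) * mn : Nat) : Int) := by push_cast; ring
      rw [e8, PySem.List.pyGetD_of_nonneg a 0 (by omega)]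
      congr 1
      omega
    rw [hA, hB, List.sum_map_mul_right, mul_comm]


-- ===== VERDICT (by name: the statement is the Claim_ definition above) =====
theorem solution_spec : Claim_equal_solution := by
  intro k m score _hdom hpre
  unfold Spec_solution
  exact solution_eq_alt k m score hpre
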